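-- pv_equiv track=rewrite | github.com/PeterJensen/nascom-tape | wavcas.py | _getNextZeroCross
-- ===== SOURCE A (Python) =====
-- crossUp   = 1
--
-- crossDown = 2
--
-- def _getNextZeroCross(frames, startFrame):
--   if startFrame == None or startFrame >= len(frames):
--     return None, None, None
--   fi  = startFrame
--   startVal = frames[startFrame]
--   maxSample = 0
--   fi += 1
--   while fi < len(frames):
--     if frames[fi-1] > 0x80 and frames[fi] <= 0x80:
--       return fi, maxSample, crossDown
--     elif frames[fi-1] < 0x80 and frames[fi] >= 0x80:
--       return fi, maxSample, crossUp
--     sample = abs(frames[fi] - 0x80)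
--     if maxSample < sample:
--       maxSample = sample
--     fi += 1
--   return None, None, None
-- ===== SOURCE B (Python) =====
-- crossUp   = 1
--
-- crossDown = 2
--
-- def _getNextZeroCross(frames, startFrame):
--   n = len(frames)
--   if startFrame is None or not (0 <= startFrame < n):
--     return None, None, None
--   cross = None
--   for fi in range(startFrame + 1, n):
--     if frames[fi - 1] > 0x80 and frames[fi] <= 0x80:
--       cross = (fi, crossDown)
--       break
--     if frames[fi - 1] < 0x80 and frames[fi] >= 0x80:
--       cross = (fi, crossUp)
--       break
--   if cross is None:
--     return None, None, None
--   c, kind = cross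
--   maxSample = max((abs(frames[i] - 0x80) for i in range(startFrame + 1, c)), default=0)
--   return c, maxSample, kind
-- ===== Notes on version B (the rewrite author's own statement) =====
-- stated objective: alternative
-- what changed: A interleaves the running-max update with the crossing test in one loop; B first locates the crossing index alone (early-exit pair scan), then computes the max amplitude in a separate pass over the prefix up to the crossing, and treats a negative startFrame as out of range instead of Python's negative-index wraparound.
-- intended difference: For an in-range negative startFrame whose scanned window contains a zero crossing, A returns a crossing index produced by Python's negative-index wraparound (possibly itself negative, e.g. (-1, 0, 1)); B returns (None, None, None) as for any other out-of-range start, the intended out-of-range behaviour. — e.g. on _getNextZeroCross([0, 200], some (-2)): A returns (some (-1), some 0, some 1), B returns (none, none, none)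
import Mathlib
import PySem

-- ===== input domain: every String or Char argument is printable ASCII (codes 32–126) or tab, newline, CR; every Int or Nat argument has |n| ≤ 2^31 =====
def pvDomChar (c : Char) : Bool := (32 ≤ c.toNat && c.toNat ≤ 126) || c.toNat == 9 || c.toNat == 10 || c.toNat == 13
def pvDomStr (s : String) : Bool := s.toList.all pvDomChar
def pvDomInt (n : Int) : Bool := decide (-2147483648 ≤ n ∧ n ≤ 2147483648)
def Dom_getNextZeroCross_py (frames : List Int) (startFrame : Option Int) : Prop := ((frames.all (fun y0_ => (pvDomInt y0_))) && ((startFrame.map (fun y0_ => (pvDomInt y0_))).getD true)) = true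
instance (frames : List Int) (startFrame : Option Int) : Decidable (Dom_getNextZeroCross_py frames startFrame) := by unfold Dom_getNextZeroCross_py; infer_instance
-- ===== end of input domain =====

-- B finds the crossing first and computes the max amplitude in a separate pass (alternative
-- decomposition, same cost); for a negative in-bounds startFrame whose scan meets a crossing,
-- A's value comes from Python's negative-index wraparound, B returns (none, none, none) — D_ below.

def crossUp : Int := 1

def crossDown : Int := 2

-- ===== PORT A =====
-- the while loop: fuel = number of remaining iterations (len - fi).toNat; inside Pre_ every
-- index fi-1, fi accessed in the loop is in Python range, so pyGetD's default is never used
def pyLoopA (frames : List Int) : Nat → Int → Int → Option Int × Option Int × Option Int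
  | 0, _, _ => (none, none, none)
  | fuel+1, fi, maxSample =>
    if PySem.List.pyGetD frames (fi-1) 0 > 0x80 ∧ PySem.List.pyGetD frames fi 0 ≤ 0x80 then
      (some fi, some maxSample, some crossDown)
    else if PySem.List.pyGetD frames (fi-1) 0 < 0x80 ∧ PySem.List.pyGetD frames fi 0 ≥ 0x80 then
      (some fi, some maxSample, some crossUp)
    else
      pyLoopA frames fuel (fi+1)
        (if maxSample < |PySem.List.pyGetD frames fi 0 - 0x80| then |PySem.List.pyGetD frames fi 0 - 0x80| else maxSample)

-- Python's unused 'startVal = frames[startFrame]' raises IndexError iff startFrame < -len;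
-- exactly those inputs are excluded by Pre_ below, so the port omits the dead read.
def getNextZeroCross_py (frames : List Int) (startFrame : Option Int) : Option Int × Option Int × Option Int :=
  match startFrame with
  | none => (none, none, none)
  | some s =>
    if s ≥ (frames.length : Int) then (none, none, none)
    else pyLoopA frames ((frames.length : Int) - (s+1)).toNat (s+1) 0

-- ===== PORT B =====
-- first pass of B: return only the crossing index and its kind (the 'for … break' loop)
def findCrossB (frames : List Int) : Nat → Int → Option (Int × Int)
  | 0, _ => none
  | fuel+1, fi =>
    if PySem.List.pyGetD frames (fi-1) 0 > 0x80 ∧ PySem.List.pyGetD frames fi 0 ≤ 0x80 then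
      some (fi, crossDown)
    else if PySem.List.pyGetD frames (fi-1) 0 < 0x80 ∧ PySem.List.pyGetD frames fi 0 ≥ 0x80 then
      some (fi, crossUp)
    else findCrossB frames fuel (fi+1)

-- Python's max(gen, default=0): every generated value is an absolute value, hence ≥ 0,
-- so it equals a left fold of max with initial value 0 (exact on this domain)
def getNextZeroCross_py_alt (frames : List Int) (startFrame : Option Int) : Option Int × Option Int × Option Int :=
  match startFrame with
  | none => (none, none, none)
  | some s =>
    if 0 ≤ s ∧ s < (frames.length : Int) then
      match findCrossB frames ((frames.length : Int) - (s+1)).toNat (s+1) with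
      | none => (none, none, none)
      | some (c, kind) =>
        (some c,
         some (((PySem.List.pyRange (s+1) c 1).map (fun i => |PySem.List.pyGetD frames i 0 - 0x80|)).foldl max 0),
         some kind)
    else (none, none, none)

-- ===== PRECONDITION & SPEC =====
-- Pre_ excludes exactly startFrame < -len(frames), where Python A raises IndexError on frames[startFrame]
def Pre_getNextZeroCross_py (frames : List Int) (startFrame : Option Int) : Prop :=
  ∀ s ∈ startFrame, -(frames.length : Int) ≤ s
instance (frames : List Int) (startFrame : Option Int) : Decidable (Pre_getNextZeroCross_py frames startFrame) := by unfold Pre_getNextZeroCross_py; infer_instance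
def pvWitness_getNextZeroCross_py : List Int × Option Int := ([0, 100, 300, 50], some 0)

-- the two samples around (wrapped) position i straddle the 0x80 midline, the first strictly off it
def crossAt (frames : List Int) (i : Int) : Bool :=
  decide (PySem.List.pyGetD frames (i-1) 0 - 0x80 ≠ 0 ∧
          (PySem.List.pyGetD frames (i-1) 0 - 0x80) * (PySem.List.pyGetD frames i 0 - 0x80) ≤ 0)

-- For an in-range negative startFrame whose scan region contains a zero crossing, A returns a
-- crossing index obtained through Python's negative-index wraparound (possibly itself negative),
-- an artefact of negative indexing; B returns (none, none, none) as for any other out-of-range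
-- start, the intended out-of-range behaviour.
def D_getNextZeroCross_py (frames : List Int) (startFrame : Option Int) : Prop :=
  ∃ s ∈ startFrame, -(frames.length : Int) ≤ s ∧ s < 0 ∧
    ∃ i ∈ PySem.List.pyRange (s+1) (frames.length : Int) 1, crossAt frames i = true
instance (frames : List Int) (startFrame : Option Int) : Decidable (D_getNextZeroCross_py frames startFrame) := by unfold D_getNextZeroCross_py; infer_instance

def Spec_getNextZeroCross_py (frames : List Int) (startFrame : Option Int) (out : Option Int × Option Int × Option Int) : Prop := ¬ D_getNextZeroCross_py frames startFrame → out = getNextZeroCross_py_alt frames startFrame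
instance (frames : List Int) (startFrame : Option Int) (out : Option Int × Option Int × Option Int) : Decidable (Spec_getNextZeroCross_py frames startFrame out) := by unfold Spec_getNextZeroCross_py; infer_instance

def pvDiffWitness_getNextZeroCross_py : List Int × Option Int := ([0, 200], some (-2))
def pvDiffWitnessOut_getNextZeroCross_py : (Option Int × Option Int × Option Int) × (Option Int × Option Int × Option Int) :=
  ((some (-1), some 0, some 1), (none, none, none))

-- ===== CLAIM (what is proved, stated in full; the proofs are below) =====
def Claim_unchanged_getNextZeroCross_py : Prop := ∀ (frames : List Int) (startFrame : Option Int), Dom_getNextZeroCross_py frames startFrame → Pre_getNextZeroCross_py frames startFrame → Spec_getNextZeroCross_py frames startFrame (getNextZeroCross_py frames startFrame)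
def Claim_changed_getNextZeroCross_py : Prop := Dom_getNextZeroCross_py (pvDiffWitness_getNextZeroCross_py.1) (pvDiffWitness_getNextZeroCross_py.2) ∧ Pre_getNextZeroCross_py (pvDiffWitness_getNextZeroCross_py.1) (pvDiffWitness_getNextZeroCross_py.2) ∧ D_getNextZeroCross_py (pvDiffWitness_getNextZeroCross_py.1) (pvDiffWitness_getNextZeroCross_py.2) ∧ getNextZeroCross_py (pvDiffWitness_getNextZeroCross_py.1) (pvDiffWitness_getNextZeroCross_py.2) = pvDiffWitnessOut_getNextZeroCross_py.1 ∧ getNextZeroCross_py_alt (pvDiffWitness_getNextZeroCross_py.1) (pvDiffWitness_getNextZeroCross_py.2) = pvDiffWitnessOut_getNextZeroCross_py.2 ∧ pvDiffWitnessOut_getNextZeroCross_py.1 ≠ pvDiffWitnessOut_getNextZeroCross_py.2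
def Claim_exact_getNextZeroCross_py : Prop := ∀ (frames : List Int) (startFrame : Option Int), Dom_getNextZeroCross_py frames startFrame → Pre_getNextZeroCross_py frames startFrame → D_getNextZeroCross_py frames startFrame → getNextZeroCross_py frames startFrame ≠ getNextZeroCross_py_alt frames startFrame

-- ===== LEMMAS AND PROOFS =====

-- the straddle test of D_ is exactly the disjunction of the two branch conditions of the loops
lemma crossAt_iff (frames : List Int) (i : Int) :
    crossAt frames i = true ↔
      ((PySem.List.pyGetD frames (i-1) 0 > 0x80 ∧ PySem.List.pyGetD frames i 0 ≤ 0x80) ∨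
       (PySem.List.pyGetD frames (i-1) 0 < 0x80 ∧ PySem.List.pyGetD frames i 0 ≥ 0x80)) := by
  rw [crossAt, decide_eq_true_iff, mul_nonpos_iff]
  omega

-- no straddle anywhere in the scanned window: the crossing search comes back empty
lemma findCrossB_eq_none (frames : List Int) : ∀ (fuel : Nat) (fi : Int),
    (∀ i : Int, fi ≤ i → i < fi + fuel → crossAt frames i = false) →
    findCrossB frames fuel fi = none := by
  intro fuel
  induction fuel with
  | zero => intro fi _; rfl
  | succ n ih =>
    intro fi h
    have hfi : crossAt frames fi = false := h fi le_rfl (by push_cast; omega)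
    have hfi' := (crossAt_iff frames fi).not.mp (by simp [hfi])
    push Not at hfi'
    unfold findCrossB
    rw [if_neg (fun hx => by have := hfi'.1 hx.1; omega),
        if_neg (fun hx => by have := hfi'.2 hx.1; omega)]
    exact ih (fi+1) (fun i h1 h2 => h i (by omega) (by push_cast at h2 ⊢; omega))

-- a straddle inside the scanned window: the crossing search finds one
lemma findCrossB_isSome (frames : List Int) : ∀ (fuel : Nat) (fi i : Int),
    fi ≤ i → i < fi + fuel → crossAt frames i = true →
    (findCrossB frames fuel fi).isSome = true := by
  intro fuel
  induction fuel with
  | zero => intro fi i h1 h2 _; push_cast at h2; omega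
  | succ n ih =>
    intro fi i h1 h2 hc
    unfold findCrossB
    split_ifs with hb1 hb2
    · rfl
    · rfl
    · by_cases hi : i = fi
      · subst hi
        rcases (crossAt_iff frames i).mp hc with h | h
        · exact absurd h hb1
        · exact absurd h hb2
      · exact ih (fi+1) i (by omega) (by push_cast at h2 ⊢; omega) hc

-- a crossing found from fi lies at index ≥ fi
lemma findCrossB_ge (frames : List Int) : ∀ (fuel : Nat) (fi c t : Int),
    findCrossB frames fuel fi = some (c, t) → fi ≤ c := by
  intro fuel
  induction fuel with
  | zero => intro fi c t h; simp [findCrossB] at h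
  | succ n ih =>
    intro fi c t h
    unfold findCrossB at h
    split_ifs at h with h1 h2
    · simp at h; omega
    · simp at h; omega
    · have := ih (fi+1) c t h; omega

-- A's single loop equals B's decomposition: crossing search plus a fold for the max
lemma loopA_eq (frames : List Int) : ∀ (fuel : Nat) (fi m : Int),
    pyLoopA frames fuel fi m =
      match findCrossB frames fuel fi with
      | none => (none, none, none)
      | some (c, t) =>
        (some c,
         some (((PySem.List.pyRange fi c 1).map (fun i => |PySem.List.pyGetD frames i 0 - 0x80|)).foldl max m),
         some t) := by
  intro fuel
  induction fuel with
  | zero => intro fi m; simp [pyLoopA, findCrossB]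
  | succ n ih =>
    intro fi m
    unfold pyLoopA findCrossB
    have hmax : (if m < |PySem.List.pyGetD frames fi 0 - 0x80| then |PySem.List.pyGetD frames fi 0 - 0x80| else m)
        = max m |PySem.List.pyGetD frames fi 0 - 0x80| := by
      rw [max_def]; split_ifs <;> omega
    rw [hmax]
    split_ifs with h1 h2
    · simp [PySem.List.pyRange_one_eq_nil (le_refl fi)]
    · simp [PySem.List.pyRange_one_eq_nil (le_refl fi)]
    · rw [ih]
      cases hf : findCrossB frames n (fi+1) with
      | none => simp
      | some ct =>
        obtain ⟨c, t⟩ := ct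
        have hge : fi + 1 ≤ c := findCrossB_ge frames n (fi+1) c t hf
        have hlt : fi < c := by omega
        dsimp only
        rw [PySem.List.pyRange_one_cons hlt, List.map_cons, List.foldl_cons]

-- ===== VERDICT (by name: the statement is the Claim_ definition above) =====
theorem getNextZeroCross_py_spec : Claim_unchanged_getNextZeroCross_py := by
  intro frames startFrame _hdom hpre hnd
  cases startFrame with
  | none => rfl
  | some s =>
    have hlb : -(frames.length : Int) ≤ s := hpre s rfl
    by_cases hneg : s < 0
    · -- out-of-range negative start: ¬D_ says the scanned window has no crossing, so A also
      -- falls through its loop and returns (none, none, none), like B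
      have hnone : findCrossB frames ((frames.length : Int) - (s+1)).toNat (s+1) = none := by
        apply findCrossB_eq_none
        intro i hi1 hi2
        by_contra hc
        rw [Bool.not_eq_false] at hc
        refine hnd ⟨s, rfl, hlb, hneg, i, PySem.List.mem_pyRange_one.mpr ⟨hi1, ?_⟩, hc⟩
        push_cast at hi2
        omega
      unfold getNextZeroCross_py getNextZeroCross_py_alt
      dsimp only
      rw [if_neg (show ¬ s ≥ (frames.length : Int) by omega), loopA_eq, hnone,
          if_neg (show ¬(0 ≤ s ∧ s < (frames.length : Int)) by omega)]
    · unfold getNextZeroCross_py getNextZeroCross_py_alt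
      dsimp only
      by_cases hge : s ≥ (frames.length : Int)
      · simp [hge, show ¬(0 ≤ s ∧ s < (frames.length : Int)) by omega]
      · simp only [if_neg hge, if_pos (show 0 ≤ s ∧ s < (frames.length : Int) by omega)]
        rw [loopA_eq]

theorem getNextZeroCross_py_changed : Claim_changed_getNextZeroCross_py := by
  unfold Claim_changed_getNextZeroCross_py; decide

theorem getNextZeroCross_py_tight : Claim_exact_getNextZeroCross_py := by
  intro frames startFrame _hdom _hpre hd
  obtain ⟨s, hs, hlb, hneg, i, hmem, hc⟩ := hd
  rw [Option.mem_def] at hs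
  subst hs
  obtain ⟨hi1, hi2⟩ := PySem.List.mem_pyRange_one.mp hmem
  have hsome : (findCrossB frames ((frames.length : Int) - (s+1)).toNat (s+1)).isSome = true :=
    findCrossB_isSome frames _ (s+1) i hi1 (by omega) hc
  obtain ⟨⟨c, t⟩, hct⟩ := Option.isSome_iff_exists.mp hsome
  unfold getNextZeroCross_py getNextZeroCross_py_alt
  dsimp only
  rw [if_neg (show ¬ s ≥ (frames.length : Int) by omega), loopA_eq, hct,
      if_neg (show ¬(0 ≤ s ∧ s < (frames.length : Int)) by omega)]
  simp
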